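-- pv_equiv track=rewrite | github.com/ogata-k/makeImage | make_img.py | is_nums_rule
-- ===== SOURCE A (Python) =====
-- def is_nums_rule(target, h, w, maxnum):
--     if len(target) != h:
--         return False
--     for l in target:
--         if len(l) != w:
--             return False
--         for c in l:
--             if c not in list(range(maxnum)):
--                 return False
--     return True
-- ===== SOURCE B (Python) =====
-- def is_nums_rule(target, h, w, maxnum):
--     # aggregate-based validation: instead of testing each row/cell individually,
--     # compare extrema (min/max) of the row widths and of the flattened cells
--     if len(target) != h:
--         return False
--     if target:
--         widths = [len(row) for row in target]
--         if min(widths) != w or max(widths) != w: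
--             return False
--     cells = [c for row in target for c in row]
--     return not cells or (0 <= min(cells) and max(cells) < maxnum)
-- ===== Notes on version B (the rewrite author's own statement) =====
-- stated objective: alternative
-- what changed: A's fused per-row loop with a per-cell membership test against list(range(maxnum)) is replaced by aggregate checks: the min and max of the row widths must both equal w, and the min and max of the flattened cell list must lie in [0, maxnum); this avoids materialising range lists and tests only extrema against the bounds.
import Mathlib
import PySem

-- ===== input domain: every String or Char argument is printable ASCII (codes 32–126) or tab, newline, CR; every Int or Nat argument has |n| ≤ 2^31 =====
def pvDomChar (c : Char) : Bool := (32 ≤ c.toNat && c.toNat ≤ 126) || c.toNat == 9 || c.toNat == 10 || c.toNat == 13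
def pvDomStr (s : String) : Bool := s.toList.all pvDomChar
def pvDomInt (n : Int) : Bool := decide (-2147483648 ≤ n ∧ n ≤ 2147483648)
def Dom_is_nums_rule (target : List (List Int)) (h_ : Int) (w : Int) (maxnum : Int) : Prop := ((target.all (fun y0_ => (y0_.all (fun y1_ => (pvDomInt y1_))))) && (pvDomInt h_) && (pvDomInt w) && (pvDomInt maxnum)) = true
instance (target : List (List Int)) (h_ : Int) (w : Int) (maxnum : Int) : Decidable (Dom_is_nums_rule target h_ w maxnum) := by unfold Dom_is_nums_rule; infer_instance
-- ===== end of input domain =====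

-- B replaces A's per-cell membership loop by aggregate (min/max) checks on the row widths and on the flattened cells; same return value on every input.

-- ===== PORT A =====
-- inner loop of A: for c in l: if c not in list(range(maxnum)): return False
-- ('c in range(maxnum)' on an int is exactly 0 ≤ c < maxnum)
def pvA_cells (m : Int) : List Int → Bool
  | [] => true
  | c :: cs => if ¬ (0 ≤ c ∧ c < m) then false else pvA_cells m cs

-- outer loop of A: per row, length check then cell loop, fused
def pvA_rows (w m : Int) : List (List Int) → Bool
  | [] => true
  | l :: ls =>
    if (l.length : Int) ≠ w then false
    else if pvA_cells m l = false then false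
    else pvA_rows w m ls

def is_nums_rule (target : List (List Int)) (h_ : Int) (w : Int) (maxnum : Int) : Bool :=
  if (target.length : Int) ≠ h_ then false
  else pvA_rows w maxnum target

-- ===== PORT B =====
def is_nums_rule_alt (target : List (List Int)) (h_ : Int) (w : Int) (maxnum : Int) : Bool :=
  if (target.length : Int) ≠ h_ then false
  else
    -- if target: widths = [len(row) for row in target]; if min(widths) != w or max(widths) != w: return False
    let widths : List Int := target.map (fun row => (row.length : Int))
    let badShape : Bool :=
      !target.isEmpty &&
        (match PySem.List.min? widths (fun x => x), PySem.List.max? widths (fun x => x) with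
         | some mn, some mx => decide (mn ≠ w) || decide (mx ≠ w)
         | _, _ => false)
    if badShape then false
    else
      -- cells = [c for row in target for c in row]; return not cells or (0 <= min(cells) and max(cells) < maxnum)
      let cells : List Int := target.flatMap (fun row => row)
      cells.isEmpty ||
        (match PySem.List.min? cells (fun x => x), PySem.List.max? cells (fun x => x) with
         | some mn, some mx => decide (0 ≤ mn) && decide (mx < maxnum)
         | _, _ => false)

-- ===== PRECONDITION & SPEC =====
def Spec_is_nums_rule (target : List (List Int)) (h_ : Int) (w : Int) (maxnum : Int) (out : Bool) : Prop := out = is_nums_rule_alt target h_ w maxnum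
instance (target : List (List Int)) (h_ : Int) (w : Int) (maxnum : Int) (out : Bool) : Decidable (Spec_is_nums_rule target h_ w maxnum out) := by unfold Spec_is_nums_rule; infer_instance

-- ===== CLAIM (what is proved, stated in full; the proofs are below) =====
def Claim_equal_is_nums_rule : Prop := ∀ (target : List (List Int)) (h_ : Int) (w : Int) (maxnum : Int), Dom_is_nums_rule target h_ w maxnum → Spec_is_nums_rule target h_ w maxnum (is_nums_rule target h_ w maxnum)

-- ===== LEMMAS AND PROOFS =====
theorem pvA_cells_eq_all (m : Int) (l : List Int) :
    pvA_cells m l = l.all (fun c => decide (0 ≤ c ∧ c < m)) := by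
  induction l with
  | nil => rfl
  | cons c cs ih => by_cases h : 0 ≤ c ∧ c < m <;> simp [pvA_cells, h, ih]

theorem pvA_rows_eq (w m : Int) (ls : List (List Int)) :
    pvA_rows w m ls =
      (ls.all (fun l => decide ((l.length : Int) = w)) &&
        ls.all (fun l => l.all (fun c => decide (0 ≤ c ∧ c < m)))) := by
  induction ls with
  | nil => rfl
  | cons l ls ih =>
    simp only [pvA_rows, List.all_cons]
    by_cases hw : (l.length : Int) = w
    · rw [if_neg (not_not_intro hw)]
      cases hall : l.all (fun c => decide (0 ≤ c ∧ c < m)) with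
      | false =>
        rw [if_pos (by rw [pvA_cells_eq_all, hall])]
        simp [hw]
      | true =>
        rw [if_neg (by rw [pvA_cells_eq_all, hall]; simp), ih]
        simp [hw]
    · rw [if_pos hw]; simp [hw]

-- min/max bracket the whole list
theorem min_max_bounds_iff (l : List Int) (mn mx a b : Int)
    (hmn : PySem.List.min? l (fun x => x) = some mn)
    (hmx : PySem.List.max? l (fun x => x) = some mx) :
    (a ≤ mn ∧ mx ≤ b) ↔ (∀ c ∈ l, a ≤ c ∧ c ≤ b) := by
  constructor
  · rintro ⟨h1, h2⟩ c hc
    exact ⟨le_trans h1 (PySem.List.min?_isMin hmn c hc),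
           le_trans (PySem.List.max?_isMax hmx c hc) h2⟩
  · intro h
    exact ⟨(h mn (PySem.List.min?_mem hmn)).1, (h mx (PySem.List.max?_mem hmx)).2⟩

-- ===== VERDICT (by name: the statement is the Claim_ definition above) =====
theorem is_nums_rule_spec : Claim_equal_is_nums_rule := by
  intro target h_ w maxnum _
  unfold Spec_is_nums_rule is_nums_rule is_nums_rule_alt
  by_cases hh : (target.length : Int) = h_
  · rw [if_neg (not_not_intro hh), if_neg (not_not_intro hh), pvA_rows_eq]
    cases target with
    | nil => simp
    | cons r rs =>
      simp only [List.isEmpty_cons, Bool.not_false, Bool.true_and]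
      -- widths are nonempty, so min?/max? are some
      obtain ⟨mnw, hmnw⟩ : ∃ m, PySem.List.min? ((r :: rs).map (fun row => (row.length : Int))) (fun x => x) = some m := by
        cases h : PySem.List.min? ((r :: rs).map (fun row => (row.length : Int))) (fun x => x) with
        | none => exact absurd ((PySem.List.min?_eq_none_iff _ _).mp h) (by simp)
        | some m => exact ⟨m, rfl⟩
      obtain ⟨mxw, hmxw⟩ : ∃ m, PySem.List.max? ((r :: rs).map (fun row => (row.length : Int))) (fun x => x) = some m := by
        cases h : PySem.List.max? ((r :: rs).map (fun row => (row.length : Int))) (fun x => x) with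
        | none => exact absurd ((PySem.List.max?_eq_none_iff _ _).mp h) (by simp)
        | some m => exact ⟨m, rfl⟩
      rw [hmnw, hmxw]
      by_cases hshape : mnw = w ∧ mxw = w
      · have hallw : ∀ l ∈ (r :: rs), (l.length : Int) = w := by
          have := (min_max_bounds_iff _ mnw mxw w w hmnw hmxw).mp ⟨le_of_eq hshape.1.symm, le_of_eq hshape.2⟩
          intro l hl
          have := this _ (List.mem_map_of_mem hl)
          omega
        rw [if_neg (by simp [hshape.1, hshape.2])]
        have h1 : (r :: rs).all (fun l => decide ((l.length : Int) = w)) = true := by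
          simp only [List.all_eq_true, decide_eq_true_eq]; exact hallw
        rw [h1, Bool.true_and]
        -- value side: flatMap cells vs per-row all
        cases hcells : (r :: rs).flatMap (fun row => row) with
        | nil =>
          have hall : ((r :: rs).all fun l => l.all fun c => decide (0 ≤ c ∧ c < maxnum)) = true := by
            simp only [List.all_eq_true, decide_eq_true_eq]
            intro l hl c hc
            exact absurd (hcells ▸ List.mem_flatMap.mpr ⟨l, hl, hc⟩) (List.not_mem_nil)
          rw [hall]; simp
        | cons c cs =>
          obtain ⟨mnc, hmnc⟩ : ∃ m, PySem.List.min? (c :: cs) (fun x => x) = some m := by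
            cases h : PySem.List.min? (c :: cs) (fun x => x) with
            | none => exact absurd ((PySem.List.min?_eq_none_iff _ _).mp h) (by simp)
            | some m => exact ⟨m, rfl⟩
          obtain ⟨mxc, hmxc⟩ : ∃ m, PySem.List.max? (c :: cs) (fun x => x) = some m := by
            cases h : PySem.List.max? (c :: cs) (fun x => x) with
            | none => exact absurd ((PySem.List.max?_eq_none_iff _ _).mp h) (by simp)
            | some m => exact ⟨m, rfl⟩
          rw [hmnc, hmxc]
          have hbr := min_max_bounds_iff (c :: cs) mnc mxc 0 (maxnum - 1) hmnc hmxc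
          by_cases hok : 0 ≤ mnc ∧ mxc < maxnum
          · have hall : ∀ x ∈ (c :: cs), 0 ≤ x ∧ x ≤ maxnum - 1 := hbr.mp ⟨hok.1, by omega⟩
            have h2 : (r :: rs).all (fun l => l.all (fun c => decide (0 ≤ c ∧ c < maxnum))) = true := by
              simp only [List.all_eq_true, decide_eq_true_eq]
              intro l hl x hx
              have := hall x (hcells ▸ List.mem_flatMap.mpr ⟨l, hl, hx⟩)
              omega
            rw [h2]; simp [hok.1, hok.2]
          · have h2 : (r :: rs).all (fun l => l.all (fun c => decide (0 ≤ c ∧ c < maxnum))) = false := by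
              by_contra hcon
              have htrue : (r :: rs).all (fun l => l.all (fun c => decide (0 ≤ c ∧ c < maxnum))) = true := by
                revert hcon; cases (r :: rs).all (fun l => l.all (fun c => decide (0 ≤ c ∧ c < maxnum))) <;> simp
              have := List.all_eq_true.mp htrue
              apply hok
              have : ∀ x ∈ (c :: cs), 0 ≤ x ∧ x ≤ maxnum - 1 := by
                intro x hx
                obtain ⟨l, hl, hxl⟩ := List.mem_flatMap.mp (hcells ▸ hx)
                have := List.all_eq_true.mp (this l hl) x hxl
                simp only [decide_eq_true_eq] at this
                omega
              have := hbr.mpr this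
              omega
            simp only [h2, List.isEmpty_cons, Bool.false_or]
            have : (decide (0 ≤ mnc) && decide (mxc < maxnum)) = false := by
              rcases not_and_or.mp hok with h | h <;> simp [h]
            simp [this]
      · -- some width differs from w: both sides false
        rw [if_pos (by rcases not_and_or.mp hshape with h | h <;> simp [h])]
        have : (r :: rs).all (fun l => decide ((l.length : Int) = w)) = false := by
          by_contra hcon
          have htrue : (r :: rs).all (fun l => decide ((l.length : Int) = w)) = true := by
            revert hcon; cases (r :: rs).all (fun l => decide ((l.length : Int) = w)) <;> simp
          have hall := List.all_eq_true.mp htrue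
          apply hshape
          have hb : ∀ x ∈ (r :: rs).map (fun row => (row.length : Int)), w ≤ x ∧ x ≤ w := by
            intro x hx
            obtain ⟨l, hl, rfl⟩ := List.mem_map.mp hx
            have := hall l hl
            simp only [decide_eq_true_eq] at this
            omega
          have h1' := hb _ (PySem.List.min?_mem hmnw)
          have h2' := hb _ (PySem.List.max?_mem hmxw)
          exact ⟨by omega, by omega⟩
        simp [this]
  · rw [if_pos hh, if_pos hh]
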